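-- pv_equiv track=rewrite | github.com/JohanLi1990/google-python-course | leetCodePython/L2503.py | maxPointsII
-- ===== SOURCE A (Python) =====
-- import heapq
-- from typing import List
--
-- def maxPointsII(grid: List[List[int]], queries: List[int]) -> List[int]:
--     m, n = len(grid), len(grid[0])
--     directions = [(0, 1), (1, 0), (0, -1), (-1, 0)]
--     visited = [[False] * n for _ in range(m)]
--     min_heap = [(grid[0][0], 0, 0)]
--     visited[0][0] = True
--     points = 0
--
--     # Sort queries and keep track of original indices
--     sorted_queries = sorted((q, i) for i, q in enumerate(queries))
--     result = [0] * len(queries)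
--
--     for query, original_index in sorted_queries:
--         while min_heap and min_heap[0][0] < query:
--             _, x, y = heapq.heappop(min_heap)
--             points += 1
--             for dx, dy in directions:
--                 nx, ny = x + dx, y + dy
--                 if 0 <= nx < m and 0 <= ny < n and not visited[nx][ny]:
--                     visited[nx][ny] = True
--                     heapq.heappush(min_heap, (grid[nx][ny], nx, ny))
--         result[original_index] = points
--
--     return result
-- ===== SOURCE B (Python) =====
-- from typing import List
--
-- def maxPointsII(grid: List[List[int]], queries: List[int]) -> List[int]:
--     # Per-query flood fill: for each threshold, count the cells reachable from
--     # (0,0) through cells with value < query, with a fresh DFS (explicit stack).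
--     m, n = len(grid), len(grid[0])
--
--     def count(q: int) -> int:
--         if grid[0][0] >= q:
--             return 0
--         seen = [[False] * n for _ in range(m)]
--         seen[0][0] = True
--         stack = [(0, 0)]
--         cnt = 0
--         while stack:
--             x, y = stack.pop()
--             cnt += 1
--             for nx, ny in ((x, y + 1), (x + 1, y), (x, y - 1), (x - 1, y)):
--                 if 0 <= nx < m and 0 <= ny < n and not seen[nx][ny] and grid[nx][ny] < q:
--                     seen[nx][ny] = True
--                     stack.append((nx, ny))
--         return cnt
--
--     return [count(q) for q in queries]
-- ===== Notes on version B (the rewrite author's own statement) =====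
-- stated objective: alternative
-- what changed: Replaces the single incremental min-heap (Dijkstra-like) frontier expansion shared across the sorted queries by an independent per-query DFS flood fill with an explicit stack that counts the cells reachable from (0,0) through values below the threshold.
-- outside the precondition, e.g. on maxPointsII([[5, 1], [7]], [3]): A returns [0], B returns [0]
import Mathlib
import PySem

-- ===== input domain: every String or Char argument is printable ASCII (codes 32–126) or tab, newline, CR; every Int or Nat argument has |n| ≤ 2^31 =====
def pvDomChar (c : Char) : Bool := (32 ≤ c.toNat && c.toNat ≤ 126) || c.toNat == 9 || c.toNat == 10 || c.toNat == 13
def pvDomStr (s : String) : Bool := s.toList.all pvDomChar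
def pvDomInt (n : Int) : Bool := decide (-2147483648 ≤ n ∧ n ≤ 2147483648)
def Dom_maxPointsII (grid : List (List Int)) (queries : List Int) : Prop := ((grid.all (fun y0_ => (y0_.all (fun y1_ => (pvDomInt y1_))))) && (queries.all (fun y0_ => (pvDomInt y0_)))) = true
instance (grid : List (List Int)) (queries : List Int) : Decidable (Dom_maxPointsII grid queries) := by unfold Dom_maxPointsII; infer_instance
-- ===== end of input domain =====

-- B replaces A's shared incremental min-heap frontier expansion over the sorted queries
-- by an independent per-query DFS flood fill (objective: alternative decomposition, not faster).


-- ===== PORT A =====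
-- grid[x][y] as a total function; under Pre_ every access the programs make is in range,
-- so the default 0 is never the value of a performed access.
def gval (grid : List (List Int)) (x y : Int) : Int :=
  PySem.List.pyGetD (PySem.List.pyGetD grid x []) y 0

-- visited[x][y] read / write on a list-of-lists of booleans (in range under Pre_).
def vget (w : List (List Bool)) (x y : Int) : Bool :=
  PySem.List.pyGetD (PySem.List.pyGetD w x []) y false

def vset (w : List (List Bool)) (x y : Int) : List (List Bool) :=
  PySem.List.pySetD w x (PySem.List.pySetD (PySem.List.pyGetD w x []) y true)

-- directions = [(0,1),(1,0),(0,-1),(-1,0)]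
def pvDirs : List (Int × Int) := [(0, 1), (1, 0), (0, -1), (-1, 0)]

-- heapq heap of (value, x, y) triples, modelled by its sorted element list:
-- heappush = insert at the lexicographic position, heappop = take the head (the minimum).
-- Exact for A's use of heapq: the heap is only observed through push/pop/peek-of-min,
-- and all triples are distinct (each cell is pushed at most once).
def hLe (a b : Int × Int × Int) : Bool :=
  decide (a.1 < b.1) || (decide (a.1 = b.1) &&
    (decide (a.2.1 < b.2.1) || (decide (a.2.1 = b.2.1) && decide (a.2.2 ≤ b.2.2))))

-- the `while min_heap and min_heap[0][0] < query` loop; fuel (m*n)+1 bounds the pops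
-- (each pop marks a distinct in-bounds cell), proved sufficient below.
def aLoop (grid : List (List Int)) (m n q : Int) :
    Nat → List (List Bool) → List (Int × Int × Int) → Int →
    List (List Bool) × List (Int × Int × Int) × Int
  | 0, w, h, pts => (w, h, pts)
  | Nat.succ fuel, w, h, pts =>
    match h with
    | [] => (w, [], pts)
    | (v, x, y) :: rest =>
      if v < q then
        let s := pvDirs.foldl
          (fun (s : List (List Bool) × List (Int × Int × Int)) d =>
            let nx := x + d.1
            let ny := y + d.2
            if 0 ≤ nx ∧ nx < m ∧ 0 ≤ ny ∧ ny < n ∧ ¬(vget s.1 nx ny = true) then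
              (vset s.1 nx ny, PySem.List.insertBy hLe (gval grid nx ny, nx, ny) s.2)
            else s)
          (w, rest)
        aLoop grid m n q fuel s.1 s.2 (pts + 1)
      else (w, (v, x, y) :: rest, pts)

def maxPointsII (grid : List (List Int)) (queries : List Int) : List Int :=
  let m : Int := grid.length
  let n : Int := (PySem.List.pyGetD grid 0 []).length
  let w1 := vset (List.replicate m.toNat (List.replicate n.toNat false)) 0 0
  let h0 : List (Int × Int × Int) := [(gval grid 0 0, 0, 0)]
  -- sorted((q, i) for i, q in enumerate(queries))
  let sq := PySem.List.sorted2
    ((PySem.List.enumerate queries).map (fun p => (p.2, p.1)))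
    (fun p => p.1) (fun p => p.2) false
  let init : List (List Bool) × List (Int × Int × Int) × Int × List Int :=
    (w1, h0, 0, List.replicate queries.length 0)
  let fin := sq.foldl
    (fun st p =>
      let r := aLoop grid m n p.1 ((m * n).toNat + 1) st.1 st.2.1 st.2.2.1
      (r.1, r.2.1, r.2.2, PySem.List.pySetD st.2.2.2 p.2 r.2.2))
    init
  fin.2.2.2

-- ===== PORT B =====
-- the `while stack:` DFS loop of Source B; the stack top (Python list end) is the list head here.
def bLoop (grid : List (List Int)) (m n q : Int) :
    Nat → List (List Bool) → List (Int × Int) → Int → Int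
  | 0, _, _, cnt => cnt
  | Nat.succ fuel, s, st, cnt =>
    match st with
    | [] => cnt
    | (x, y) :: rest =>
      let r := [(x, y + 1), (x + 1, y), (x, y - 1), (x - 1, y)].foldl
        (fun (s : List (List Bool) × List (Int × Int)) c =>
          if 0 ≤ c.1 ∧ c.1 < m ∧ 0 ≤ c.2 ∧ c.2 < n ∧ ¬(vget s.1 c.1 c.2 = true) ∧
              gval grid c.1 c.2 < q then
            (vset s.1 c.1 c.2, c :: s.2)
          else s)
        (s, rest)
      bLoop grid m n q fuel r.1 r.2 (cnt + 1)

def maxPointsII_alt (grid : List (List Int)) (queries : List Int) : List Int :=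
  let m : Int := grid.length
  let n : Int := (PySem.List.pyGetD grid 0 []).length
  queries.map (fun q =>
    if gval grid 0 0 ≥ q then 0
    else
      bLoop grid m n q ((m * n).toNat + 1)
        (vset (List.replicate m.toNat (List.replicate n.toNat false)) 0 0)
        [(0, 0)] 0)

-- ===== PRECONDITION & SPEC =====
-- Pre_ excludes inputs where Python A raises IndexError (empty grid, empty first row) and,
-- because reachability decides whether a short row is ever indexed, it also excludes all
-- ragged grids with a row shorter than row 0 — on some of those A still returns (the short
-- row is never reached); B behaves exactly like A there.
def Pre_maxPointsII (grid : List (List Int)) (queries : List Int) : Prop :=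
  0 < grid.length ∧ 0 < (PySem.List.pyGetD grid 0 []).length ∧
    ∀ row ∈ grid, (PySem.List.pyGetD grid 0 []).length ≤ row.length

instance (grid : List (List Int)) (queries : List Int) : Decidable (Pre_maxPointsII grid queries) := by
  unfold Pre_maxPointsII; infer_instance

def pvWitness_maxPointsII : List (List Int) × List Int := ([[1, 2], [3, 4]], [2, 5, 0])

def Spec_maxPointsII (grid : List (List Int)) (queries : List Int) (out : List Int) : Prop := out = maxPointsII_alt grid queries
instance (grid : List (List Int)) (queries : List Int) (out : List Int) : Decidable (Spec_maxPointsII grid queries out) := by unfold Spec_maxPointsII; infer_instance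

-- ===== CLAIM (what is proved, stated in full; the proofs are below) =====
def Claim_equal_maxPointsII : Prop := ∀ (grid : List (List Int)) (queries : List Int), Dom_maxPointsII grid queries → Pre_maxPointsII grid queries → Spec_maxPointsII grid queries (maxPointsII grid queries)

-- ===== LEMMAS AND PROOFS =====

-- in-bounds cells, the 4-neighbour list, reachability through values < q
def inb (m n : Int) (c : Int × Int) : Prop :=
  0 ≤ c.1 ∧ c.1 < m ∧ 0 ≤ c.2 ∧ c.2 < n

def nbrs (c : Int × Int) : List (Int × Int) :=
  [(c.1, c.2 + 1), (c.1 + 1, c.2), (c.1, c.2 - 1), (c.1 - 1, c.2)]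

inductive Reach (grid : List (List Int)) (m n q : Int) : Int × Int → Prop
  | base : gval grid 0 0 < q → Reach grid m n q (0, 0)
  | step (c d : Int × Int) : Reach grid m n q c → d ∈ nbrs c → inb m n d →
      gval grid d.1 d.2 < q → Reach grid m n q d

theorem Reach_mono (grid : List (List Int)) (m n q q' : Int) (h : q ≤ q')
    (c : Int × Int) (hr : Reach grid m n q c) : Reach grid m n q' c := by
  induction hr with
  | base h0 => exact Reach.base (lt_of_lt_of_le h0 h)
  | step c d _ hd hi hv ih => exact Reach.step c d ih hd hi (lt_of_lt_of_le hv h)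

theorem Reach_base_lt (grid : List (List Int)) (m n q : Int) (c : Int × Int)
    (hr : Reach grid m n q c) : gval grid 0 0 < q := by
  induction hr with
  | base h0 => exact h0
  | step _ _ _ _ _ _ ih => exact ih

theorem Reach_inb (grid : List (List Int)) (m n q : Int) (hm : 0 < m) (hn : 0 < n)
    (c : Int × Int) (hr : Reach grid m n q c) : inb m n c := by
  induction hr with
  | base _ => exact ⟨le_refl 0, hm, le_refl 0, hn⟩
  | step _ d _ _ hi _ _ => exact hi

noncomputable def allCells (m n : Int) : Finset (Int × Int) := Finset.Ico 0 m ×ˢ Finset.Ico 0 n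

theorem mem_allCells (m n : Int) (c : Int × Int) : c ∈ allCells m n ↔ inb m n c := by
  simp [allCells, inb, Finset.mem_product, Finset.mem_Ico, and_assoc]

theorem card_allCells (m n : Int) (hm : 0 ≤ m) (hn : 0 ≤ n) :
    (allCells m n).card = (m * n).toNat := by
  simp only [allCells, Finset.card_product, Int.card_Ico]
  rw [Int.sub_zero, Int.sub_zero, Int.toNat_mul hm hn]

-- visited-grid representation
def Shape (m n : Int) (w : List (List Bool)) : Prop :=
  w.length = m.toNat ∧ ∀ row ∈ w, row.length = n.toNat

def RepV (m n : Int) (w : List (List Bool)) (V : Finset (Int × Int)) : Prop :=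
  Shape m n w ∧ ∀ c : Int × Int, inb m n c → (vget w c.1 c.2 = true ↔ c ∈ V)

theorem rep_init (m n : Int) :
    RepV m n (List.replicate m.toNat (List.replicate n.toNat false)) ∅ := by
  refine ⟨⟨by simp, ?_⟩, ?_⟩
  · intro row hrow
    rw [List.eq_of_mem_replicate hrow]; simp
  · rintro ⟨x, y⟩ ⟨hx0, hxm, hy0, hyn⟩
    simp only [Finset.notMem_empty, iff_false]
    unfold vget
    rw [PySem.List.pyGetD_eq_getElem _ _ hx0 (by simp; omega)]
    rw [List.getElem_replicate]
    rw [PySem.List.pyGetD_eq_getElem _ _ hy0 (by simp; omega)]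
    simp

theorem rep_vset (m n : Int) (w : List (List Bool)) (V : Finset (Int × Int))
    (c : Int × Int) (hrep : RepV m n w V) (hc : inb m n c) :
    RepV m n (vset w c.1 c.2) (insert c V) := by
  obtain ⟨⟨hlen, hrows⟩, hmem⟩ := hrep
  obtain ⟨hx0, hxm, hy0, hyn⟩ := hc
  have hxlt : c.1.toNat < w.length := by omega
  have hrow : PySem.List.pyGetD w c.1 [] = w[c.1.toNat] := by
    rw [PySem.List.pyGetD_eq_getElem _ _ hx0 (by omega)]
  have hrlen : w[c.1.toNat].length = n.toNat := hrows _ (List.getElem_mem hxlt)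
  have hset : vset w c.1 c.2 =
      w.set c.1.toNat (w[c.1.toNat].set c.2.toNat true) := by
    unfold vset
    rw [hrow, PySem.List.pySetD_of_nonneg _ _ hy0, PySem.List.pySetD_of_nonneg _ _ hx0]
  constructor
  · constructor
    · rw [hset]; simpa using hlen
    · intro row hrowm
      rw [hset] at hrowm
      rcases List.mem_or_eq_of_mem_set hrowm with h | h
      · exact hrows _ h
      · rw [h]; simpa using hrlen
  · rintro ⟨x, y⟩ ⟨ha0, ham, hb0, hbn⟩
    simp only at ha0 ham hb0 hbn
    have hxlt' : x.toNat < w.length := by omega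
    have hrlen' : w[x.toNat].length = n.toNat := hrows _ (List.getElem_mem hxlt')
    have hget : vget (vset w c.1 c.2) x y =
        if x = c.1 ∧ y = c.2 then true else vget w x y := by
      rw [hset]
      simp only [vget]
      rw [PySem.List.pyGetD_eq_getElem _ _ ha0 (by simp; omega)]
      rw [List.getElem_set]
      by_cases hxc : x = c.1
      · have hxc2 : c.1.toNat = x.toNat := by omega
        rw [if_pos hxc2]
        rw [PySem.List.pyGetD_eq_getElem _ _ hb0 (by simp [← hxc, hrlen']; omega)]
        rw [List.getElem_set]
        by_cases hyc : y = c.2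
        · have hyc2 : c.2.toNat = y.toNat := by omega
          rw [if_pos hyc2, if_pos ⟨hxc, hyc⟩]
        · have hyc2 : ¬(c.2.toNat = y.toNat) := by omega
          rw [if_neg hyc2, if_neg (by tauto)]
          subst hxc
          rw [hrow]
          rw [PySem.List.pyGetD_eq_getElem _ _ hb0 (by rw [hrlen]; omega)]
      · have hxc2 : ¬(c.1.toNat = x.toNat) := by omega
        rw [if_neg hxc2, if_neg (by tauto)]
        rw [PySem.List.pyGetD_eq_getElem w _ ha0 (by omega)]
    rw [hget]
    by_cases hcc : x = c.1 ∧ y = c.2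
    · simp [hcc]
    · have hne : ((x, y) : Int × Int) ≠ c := by
        intro h
        apply hcc
        exact ⟨congrArg Prod.fst h, congrArg Prod.snd h⟩
      simp only [hcc, if_false]
      rw [hmem (x, y) ⟨ha0, ham, hb0, hbn⟩]
      simp [hne]

-- heap insertion facts
theorem insertBy_perm {α : Type} (before : α → α → Bool) (x : α) (ys : List α) :
    (PySem.List.insertBy before x ys).Perm (x :: ys) := by
  induction ys with
  | nil => simp [PySem.List.insertBy]
  | cons y t ih =>
    by_cases h : before x y
    · simp [PySem.List.insertBy, h]
    · simp only [PySem.List.insertBy, h]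
      simp only [Bool.false_eq_true, if_false]
      exact (ih.cons y).trans (List.Perm.swap x y t)

theorem insertBy_pairwise {α : Type} (R : α → α → Prop) (before : α → α → Bool)
    (x : α) (ys : List α)
    (htrans : ∀ a b c, R a b → R b c → R a c)
    (h1 : ∀ b, before x b = true → R x b) (h2 : ∀ b, ¬before x b = true → R b x)
    (hp : ys.Pairwise R) : (PySem.List.insertBy before x ys).Pairwise R := by
  induction ys with
  | nil => simp [PySem.List.insertBy]
  | cons y t ih =>
    rcases List.pairwise_cons.mp hp with ⟨hy, ht⟩
    by_cases h : before x y
    · simp only [PySem.List.insertBy, h, if_true]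
      refine List.pairwise_cons.mpr ⟨?_, hp⟩
      intro z hz
      rcases List.mem_cons.mp hz with h' | h'
      · rw [h']; exact h1 y h
      · exact htrans x y z (h1 y h) (hy z h')
    · simp only [PySem.List.insertBy, h]
      simp only [Bool.false_eq_true, if_false]
      refine List.pairwise_cons.mpr ⟨?_, ih ht⟩
      intro z hz
      rcases List.mem_cons.mp (((insertBy_perm before x t).mem_iff).mp hz) with h' | h'
      · rw [h']; exact h2 y h
      · exact hy z h'

-- A-side loop invariant (threshold-free core; the Reach facts are carried separately)
structure AInv (grid : List (List Int)) (m n : Int) (P V : Finset (Int × Int))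
    (w : List (List Bool)) (h : List (Int × Int × Int)) (pts : Int) : Prop where
  rep : RepV m n w V
  pts_eq : pts = (P.card : Int)
  vchar : ∀ c : Int × Int, c ∈ V ↔ c ∈ P ∨ c ∈ h.map (fun e => e.2)
  nodup : (h.map (fun e => e.2)).Nodup
  disj : ∀ c ∈ P, c ∉ h.map (fun e => e.2)
  hsort : h.Pairwise (fun a b => a.1 ≤ b.1)
  helt : ∀ e ∈ h, e.1 = gval grid e.2.1 e.2.2 ∧ inb m n e.2 ∧
    (e.2 = (0, 0) ∨ ∃ p ∈ P, e.2 ∈ nbrs p)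
  closed : ∀ c ∈ P, ∀ d ∈ nbrs c, inb m n d → d ∈ V
  origin : (0, 0) ∈ V
  pinb : ∀ c ∈ P, inb m n c

-- neighbour arithmetic
theorem mem_nbrs_of_dir (x y : Int) (d : Int × Int) (hd : d ∈ pvDirs) :
    ((x + d.1, y + d.2) : Int × Int) ∈ nbrs (x, y) := by
  simp only [pvDirs, List.mem_cons, List.not_mem_nil, or_false] at hd
  rcases hd with rfl | rfl | rfl | rfl <;>
    simp [nbrs, Prod.ext_iff] <;> omega

theorem nbrs_sub_dirs (x y : Int) (e : Int × Int) (he : e ∈ nbrs (x, y)) :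
    ∃ d ∈ pvDirs, e = (x + d.1, y + d.2) := by
  simp only [nbrs, List.mem_cons, List.not_mem_nil, or_false] at he
  rcases he with rfl | rfl | rfl | rfl
  · exact ⟨(0, 1), by simp [pvDirs], by simp⟩
  · exact ⟨(1, 0), by simp [pvDirs], by simp⟩
  · exact ⟨(0, -1), by simp [pvDirs, Prod.ext_iff]; omega⟩
  · exact ⟨(-1, 0), by simp [pvDirs, Prod.ext_iff]; omega⟩

-- the clauses of AInv that the four-direction push fold touches
structure AMid (grid : List (List Int)) (m n : Int) (P V : Finset (Int × Int))
    (w : List (List Bool)) (h : List (Int × Int × Int)) : Prop where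
  rep : RepV m n w V
  vchar : ∀ c : Int × Int, c ∈ V ↔ c ∈ P ∨ c ∈ h.map (fun e => e.2)
  nodup : (h.map (fun e => e.2)).Nodup
  disj : ∀ c ∈ P, c ∉ h.map (fun e => e.2)
  hsort : h.Pairwise (fun a b => a.1 ≤ b.1)
  helt : ∀ e ∈ h, e.1 = gval grid e.2.1 e.2.2 ∧ inb m n e.2 ∧
    (e.2 = (0, 0) ∨ ∃ p ∈ P, e.2 ∈ nbrs p)

theorem hLe_trans (a b c : Int × Int × Int) (h1 : a.1 ≤ b.1) (h2 : b.1 ≤ c.1) :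
    a.1 ≤ c.1 := le_trans h1 h2

theorem hLe_true (a b : Int × Int × Int) (h : hLe a b = true) : a.1 ≤ b.1 := by
  simp only [hLe, Bool.or_eq_true, Bool.and_eq_true, decide_eq_true_eq] at h
  omega

theorem hLe_false (a b : Int × Int × Int) (h : ¬hLe a b = true) : b.1 ≤ a.1 := by
  simp only [hLe, Bool.or_eq_true, Bool.and_eq_true, decide_eq_true_eq] at h
  omega

-- A's push-fold body, named for the proofs (definitionally the lambda in aLoop)
def aStepF (grid : List (List Int)) (m n x y : Int)
    (s : List (List Bool) × List (Int × Int × Int)) (d : Int × Int) :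
    List (List Bool) × List (Int × Int × Int) :=
  if 0 ≤ x + d.1 ∧ x + d.1 < m ∧ 0 ≤ y + d.2 ∧ y + d.2 < n ∧
      ¬(vget s.1 (x + d.1) (y + d.2) = true) then
    (vset s.1 (x + d.1) (y + d.2),
      PySem.List.insertBy hLe (gval grid (x + d.1) (y + d.2), x + d.1, y + d.2) s.2)
  else s

-- effect of the four-direction push fold of A
set_option maxHeartbeats 2000000 in
theorem aExpandGo (grid : List (List Int)) (m n x y : Int) (P : Finset (Int × Int)) :
    ∀ (ds : List (Int × Int)) (w : List (List Bool)) (h : List (Int × Int × Int))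
      (V : Finset (Int × Int)),
      (∀ d ∈ ds, d ∈ pvDirs) →
      AMid grid m n P V w h → (x, y) ∈ P →
      ∃ V',
        AMid grid m n P V' (ds.foldl (aStepF grid m n x y) (w, h)).1
          (ds.foldl (aStepF grid m n x y) (w, h)).2 ∧
        V ⊆ V' ∧
        (∀ d ∈ ds, inb m n (x + d.1, y + d.2) → ((x + d.1, y + d.2) : Int × Int) ∈ V') := by
  intro ds
  induction ds with
  | nil =>
    intro w h V _ hmid _
    exact ⟨V, by simpa using hmid, Finset.Subset.refl V, by simp⟩
  | cons d t ih =>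
    intro w h V hds hmid hxy
    simp only [List.foldl_cons, aStepF]
    by_cases hcond : 0 ≤ x + d.1 ∧ x + d.1 < m ∧ 0 ≤ y + d.2 ∧ y + d.2 < n ∧
        ¬(vget w (x + d.1) (y + d.2) = true)
    · have hinb : inb m n (x + d.1, y + d.2) := ⟨hcond.1, hcond.2.1, hcond.2.2.1, hcond.2.2.2.1⟩
      have hnotV : ((x + d.1, y + d.2) : Int × Int) ∉ V := fun hV =>
        hcond.2.2.2.2 ((hmid.rep.2 _ hinb).mpr hV)
      have hnotP : ((x + d.1, y + d.2) : Int × Int) ∉ P := fun hP =>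
        hnotV ((hmid.vchar _).mpr (Or.inl hP))
      have hnotH : ((x + d.1, y + d.2) : Int × Int) ∉ h.map (fun e => e.2) := fun hH =>
        hnotV ((hmid.vchar _).mpr (Or.inr hH))
      have hmemIns : ∀ e, e ∈ PySem.List.insertBy hLe (gval grid (x + d.1) (y + d.2), x + d.1, y + d.2) h ↔
          e = (gval grid (x + d.1) (y + d.2), x + d.1, y + d.2) ∨ e ∈ h := by
        intro e
        rw [(insertBy_perm hLe _ h).mem_iff, List.mem_cons]
      have hmid' : AMid grid m n P (insert ((x + d.1, y + d.2) : Int × Int) V)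
          (vset w (x + d.1) (y + d.2))
          (PySem.List.insertBy hLe (gval grid (x + d.1) (y + d.2), x + d.1, y + d.2) h) := by
        have hcoordsperm : ((PySem.List.insertBy hLe
            (gval grid (x + d.1) (y + d.2), x + d.1, y + d.2) h).map (fun e => e.2)).Perm
            (((x + d.1, y + d.2) : Int × Int) :: h.map (fun e => e.2)) :=
          (insertBy_perm hLe _ h).map (fun e => e.2)
        refine ⟨?_, ?_, ?_, ?_, ?_, ?_⟩
        · exact rep_vset m n w V _ hmid.rep hinb
        · intro c
          rw [hcoordsperm.mem_iff, List.mem_cons, Finset.mem_insert, hmid.vchar c]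
          tauto
        · exact hcoordsperm.nodup_iff.mpr (List.nodup_cons.mpr ⟨hnotH, hmid.nodup⟩)
        · intro c hc
          rw [hcoordsperm.mem_iff, List.mem_cons]
          rintro (rfl | hmem)
          · exact hnotP hc
          · exact hmid.disj c hc hmem
        · exact insertBy_pairwise _ hLe _ h (fun a b c => hLe_trans a b c)
            (fun b => hLe_true _ b) (fun b => hLe_false _ b) hmid.hsort
        · intro e he
          rcases (hmemIns e).mp he with rfl | he'
          · exact ⟨rfl, hinb, Or.inr ⟨(x, y), hxy, mem_nbrs_of_dir x y d (hds d (by simp))⟩⟩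
          · exact hmid.helt e he'
      rw [if_pos hcond]
      obtain ⟨V', hmidF, hsub, hcl⟩ := ih _ _ _ (fun d' hd' => hds d' (by simp [hd'])) hmid' hxy
      refine ⟨V', hmidF, ?_, ?_⟩
      · exact fun c hc => hsub (Finset.mem_insert_of_mem hc)
      · intro d' hd' hinb'
        rcases List.mem_cons.mp hd' with rfl | hd''
        · exact hsub (Finset.mem_insert_self _ _)
        · exact hcl d' hd'' hinb'
    · rw [if_neg hcond]
      obtain ⟨V', hmidF, hsub, hcl⟩ := ih _ _ _ (fun d' hd' => hds d' (by simp [hd'])) hmid hxy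
      refine ⟨V', hmidF, hsub, ?_⟩
      intro d' hd' hinb'
      rcases List.mem_cons.mp hd' with rfl | hd''
      · -- the condition failed although the cell is in bounds: it is already visited
        have hvis : vget w (x + d'.1) (y + d'.2) = true := by
          by_contra hb
          exact hcond ⟨hinb'.1, hinb'.2.1, hinb'.2.2.1, hinb'.2.2.2, hb⟩
        exact hsub ((hmid.rep.2 _ hinb').mp hvis)
      · exact hcl d' hd'' hinb'

-- one-step equations for aLoop
theorem aLoop_nil (grid : List (List Int)) (m n q : Int) (fuel : Nat)
    (w : List (List Bool)) (pts : Int) :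
    aLoop grid m n q (fuel + 1) w [] pts = (w, [], pts) := rfl

theorem aLoop_cons_pos (grid : List (List Int)) (m n q : Int) (fuel : Nat)
    (w : List (List Bool)) (v x y : Int) (rest : List (Int × Int × Int)) (pts : Int)
    (hvq : v < q) :
    aLoop grid m n q (fuel + 1) w ((v, x, y) :: rest) pts =
      aLoop grid m n q fuel (pvDirs.foldl (aStepF grid m n x y) (w, rest)).1
        (pvDirs.foldl (aStepF grid m n x y) (w, rest)).2 (pts + 1) := by
  conv_lhs => rw [aLoop]
  rw [if_pos hvq]
  rfl

theorem aLoop_cons_neg (grid : List (List Int)) (m n q : Int) (fuel : Nat)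
    (w : List (List Bool)) (v x y : Int) (rest : List (Int × Int × Int)) (pts : Int)
    (hvq : ¬v < q) :
    aLoop grid m n q (fuel + 1) w ((v, x, y) :: rest) pts = (w, (v, x, y) :: rest, pts) := by
  conv_lhs => rw [aLoop]
  rw [if_neg hvq]

theorem aLoop_spec (grid : List (List Int)) (m n q : Int) (fuel : Nat)
    (P V : Finset (Int × Int)) (w : List (List Bool)) (h : List (Int × Int × Int))
    (pts : Int) (hinv : AInv grid m n P V w h pts)
    (hreach : ∀ c ∈ P, Reach grid m n q c)
    (hfuel : (m * n).toNat + 1 ≤ fuel + P.card) :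
    ∃ P' V', P ⊆ P' ∧
      AInv grid m n P' V' (aLoop grid m n q fuel w h pts).1
        (aLoop grid m n q fuel w h pts).2.1 (aLoop grid m n q fuel w h pts).2.2 ∧
      (∀ c ∈ P', Reach grid m n q c) ∧
      (∀ e ∈ (aLoop grid m n q fuel w h pts).2.1, q ≤ e.1) := by
  induction fuel generalizing P V w h pts with
  | zero =>
    exfalso
    have hne : P.Nonempty := Finset.card_pos.mp (by omega)
    obtain ⟨c, hc⟩ := hne
    have hcinb := hinv.pinb c hc
    have hm : 0 ≤ m := le_of_lt (lt_of_le_of_lt hcinb.1 hcinb.2.1)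
    have hn : 0 ≤ n := le_of_lt (lt_of_le_of_lt hcinb.2.2.1 hcinb.2.2.2)
    have hsub : P ⊆ allCells m n := fun z hz => (mem_allCells m n z).mpr (hinv.pinb z hz)
    have := Finset.card_le_card hsub
    rw [card_allCells m n hm hn] at this
    omega
  | succ fuel ih =>
    match h with
    | [] =>
      rw [aLoop_nil]
      exact ⟨P, V, Finset.Subset.refl P, hinv, hreach, by simp⟩
    | (v, x, y) :: rest =>
      by_cases hvq : v < q
      · -- pop (x, y)
        have hhead := hinv.helt (v, x, y) (List.mem_cons_self)
        obtain ⟨hval, hinb, hpar⟩ := hhead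
        have hcmem : ((x, y) : Int × Int) ∈ ((v, x, y) :: rest).map (fun e => e.2) := by simp
        have hcnotP : ((x, y) : Int × Int) ∉ P := fun hP => hinv.disj _ hP hcmem
        have hcoords : ((v, x, y) :: rest).map (fun e => e.2) =
            ((x, y) : Int × Int) :: rest.map (fun e => e.2) := by simp
        have hnodup' := hinv.nodup
        rw [hcoords] at hnodup'
        have hcnotrest : ((x, y) : Int × Int) ∉ rest.map (fun e => e.2) :=
          (List.nodup_cons.mp hnodup').1
        have hreachc : Reach grid m n q (x, y) := by
          rcases hpar with h00 | ⟨p, hp, hnb⟩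
          · have hx0 : x = 0 := congrArg Prod.fst h00
            have hy0 : y = 0 := congrArg Prod.snd h00
            subst hx0; subst hy0
            exact Reach.base (by simpa using hval ▸ hvq)
          · exact Reach.step p (x, y) (hreach p hp) hnb hinb (by
              have : gval grid x y < q := by
                have := hval
                simp only at this
                omega
              simpa using this)
        have hmid' : AMid grid m n (insert ((x, y) : Int × Int) P) V w rest := by
          refine ⟨hinv.rep, ?_, (List.nodup_cons.mp hnodup').2, ?_, ?_, ?_⟩
          · intro c
            rw [hinv.vchar c, hcoords, List.mem_cons, Finset.mem_insert]
            constructor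
            · rintro (hP | rfl | hr)
              · exact Or.inl (Or.inr hP)
              · exact Or.inl (Or.inl rfl)
              · exact Or.inr hr
            · rintro ((rfl | hP) | hr)
              · exact Or.inr (Or.inl rfl)
              · exact Or.inl hP
              · exact Or.inr (Or.inr hr)
          · intro c hc
            rcases Finset.mem_insert.mp hc with rfl | hP
            · exact hcnotrest
            · intro hr
              exact hinv.disj c hP (by rw [hcoords]; exact List.mem_cons_of_mem _ hr)
          · exact hinv.hsort.of_cons
          · intro e he
            obtain ⟨h1, h2, h3⟩ := hinv.helt e (List.mem_cons_of_mem _ he)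
            refine ⟨h1, h2, ?_⟩
            rcases h3 with h00 | ⟨p, hp, hnb⟩
            · exact Or.inl h00
            · exact Or.inr ⟨p, Finset.mem_insert_of_mem hp, hnb⟩
        obtain ⟨V', hmidF, hsub, hcl⟩ := aExpandGo grid m n x y
          (insert ((x, y) : Int × Int) P) pvDirs w rest V (fun d hd => hd) hmid'
          (Finset.mem_insert_self _ _)
        have hinv' : AInv grid m n (insert ((x, y) : Int × Int) P) V'
            (pvDirs.foldl (aStepF grid m n x y) (w, rest)).1
            (pvDirs.foldl (aStepF grid m n x y) (w, rest)).2 (pts + 1) := by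
          refine ⟨hmidF.rep, ?_, hmidF.vchar, hmidF.nodup, hmidF.disj, hmidF.hsort,
            hmidF.helt, ?_, ?_, ?_⟩
          · rw [Finset.card_insert_of_notMem hcnotP, hinv.pts_eq]
            push_cast
            ring
          · intro c hc d hd hdinb
            rcases Finset.mem_insert.mp hc with rfl | hP
            · obtain ⟨d', hd', rfl⟩ := nbrs_sub_dirs x y d hd
              exact hcl d' hd' hdinb
            · exact hsub (hinv.closed c hP d hd hdinb)
          · exact hsub hinv.origin
          · intro c hc
            rcases Finset.mem_insert.mp hc with rfl | hP
            · exact hinb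
            · exact hinv.pinb c hP
        have hreach' : ∀ c ∈ insert ((x, y) : Int × Int) P, Reach grid m n q c := by
          intro c hc
          rcases Finset.mem_insert.mp hc with rfl | hP
          · exact hreachc
          · exact hreach c hP
        have hfuel' : (m * n).toNat + 1 ≤ fuel + (insert ((x, y) : Int × Int) P).card := by
          rw [Finset.card_insert_of_notMem hcnotP]
          omega
        obtain ⟨P'', V'', hsub'', hinv'', hreach'', hend''⟩ :=
          ih _ _ _ _ _ hinv' hreach' hfuel'
        rw [aLoop_cons_pos grid m n q fuel w v x y rest pts hvq]
        exact ⟨P'', V'', fun z hz => hsub'' (Finset.mem_insert_of_mem hz),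
          hinv'', hreach'', hend''⟩
      · rw [aLoop_cons_neg grid m n q fuel w v x y rest pts hvq]
        refine ⟨P, V, Finset.Subset.refl P, hinv, hreach, ?_⟩
        intro e he
        rcases List.mem_cons.mp he with rfl | he'
        · simpa using le_of_not_gt hvq
        · have := List.pairwise_cons.mp hinv.hsort
          have hv := this.1 e he'
          simp only at hv
          have : q ≤ v := le_of_not_gt hvq
          omega

-- after the loop ends, the popped set is exactly the reachable set
theorem aChar (grid : List (List Int)) (m n q : Int) (P V : Finset (Int × Int))
    (w : List (List Bool)) (h : List (Int × Int × Int)) (pts : Int)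
    (hinv : AInv grid m n P V w h pts) (hreach : ∀ c ∈ P, Reach grid m n q c)
    (hend : ∀ e ∈ h, q ≤ e.1) (c : Int × Int) :
    c ∈ P ↔ Reach grid m n q c := by
  constructor
  · exact hreach c
  · intro hr
    induction hr with
    | base h0 =>
      rcases (hinv.vchar (0, 0)).mp hinv.origin with hP | hH
      · exact hP
      · exfalso
        rcases List.mem_map.mp hH with ⟨e, heH, he2⟩
        have hval : e.1 = gval grid 0 0 := by
          have := (hinv.helt e heH).1
          rw [he2] at this; simpa using this
        have hq := hend e heH
        omega
    | step c d hc hd hi hv ih =>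
      have hcP := ih
      have hdV := hinv.closed c hcP d hd hi
      rcases (hinv.vchar d).mp hdV with hP | hH
      · exact hP
      · exfalso
        rcases List.mem_map.mp hH with ⟨e, heH, he2⟩
        have := (hinv.helt e heH).1
        have hq := hend e heH
        rw [he2] at this
        omega

-- B-side loop invariant
structure BInv (grid : List (List Int)) (m n q : Int) (P V : Finset (Int × Int))
    (s : List (List Bool)) (st : List (Int × Int)) (cnt : Int) : Prop where
  rep : RepV m n s V
  cnt_eq : cnt = (P.card : Int)
  vchar : ∀ c : Int × Int, c ∈ V ↔ c ∈ P ∨ c ∈ st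
  nodup : st.Nodup
  disj : ∀ c ∈ P, c ∉ st
  reachV : ∀ c ∈ V, Reach grid m n q c
  closed : ∀ c ∈ P, ∀ d ∈ nbrs c, inb m n d → gval grid d.1 d.2 < q → d ∈ V
  origin : (0, 0) ∈ V

-- B's push-fold body, named for the proofs (definitionally the lambda in bLoop)
def bStepF (grid : List (List Int)) (m n q : Int)
    (s : List (List Bool) × List (Int × Int)) (c : Int × Int) :
    List (List Bool) × List (Int × Int) :=
  if 0 ≤ c.1 ∧ c.1 < m ∧ 0 ≤ c.2 ∧ c.2 < n ∧ ¬(vget s.1 c.1 c.2 = true) ∧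
      gval grid c.1 c.2 < q then
    (vset s.1 c.1 c.2, c :: s.2)
  else s

-- the clauses of BInv that the push fold touches
structure BMid (grid : List (List Int)) (m n q : Int) (P V : Finset (Int × Int))
    (s : List (List Bool)) (st : List (Int × Int)) : Prop where
  rep : RepV m n s V
  vchar : ∀ c : Int × Int, c ∈ V ↔ c ∈ P ∨ c ∈ st
  nodup : st.Nodup
  disj : ∀ c ∈ P, c ∉ st
  reachV : ∀ c ∈ V, Reach grid m n q c

theorem bExpandGo (grid : List (List Int)) (m n q x y : Int) (P : Finset (Int × Int)) :
    ∀ (ds : List (Int × Int)) (s : List (List Bool)) (st : List (Int × Int))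
      (V : Finset (Int × Int)),
      (∀ c ∈ ds, c ∈ nbrs (x, y)) →
      BMid grid m n q P V s st → (x, y) ∈ P →
      ∃ V',
        BMid grid m n q P V' (ds.foldl (bStepF grid m n q) (s, st)).1
          (ds.foldl (bStepF grid m n q) (s, st)).2 ∧
        V ⊆ V' ∧
        (∀ c ∈ ds, inb m n c → gval grid c.1 c.2 < q → c ∈ V') := by
  intro ds
  induction ds with
  | nil =>
    intro s st V _ hmid _
    exact ⟨V, by simpa using hmid, Finset.Subset.refl V, by simp⟩
  | cons c t ih =>
    intro s st V hds hmid hxy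
    simp only [List.foldl_cons, bStepF]
    by_cases hcond : 0 ≤ c.1 ∧ c.1 < m ∧ 0 ≤ c.2 ∧ c.2 < n ∧ ¬(vget s c.1 c.2 = true) ∧
        gval grid c.1 c.2 < q
    · have hinb : inb m n c := ⟨hcond.1, hcond.2.1, hcond.2.2.1, hcond.2.2.2.1⟩
      have hnotV : c ∉ V := fun hV => hcond.2.2.2.2.1 ((hmid.rep.2 _ hinb).mpr hV)
      have hreachxy : Reach grid m n q (x, y) :=
        hmid.reachV _ ((hmid.vchar _).mpr (Or.inl hxy))
      have hreachc : Reach grid m n q c := by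
        have : c ∈ nbrs (x, y) := hds c (by simp)
        have hcc : ((c.1, c.2) : Int × Int) = c := rfl
        exact Reach.step (x, y) c hreachxy this hinb hcond.2.2.2.2.2
      have hmid' : BMid grid m n q P (insert c V) (vset s c.1 c.2) (c :: st) := by
        refine ⟨?_, ?_, ?_, ?_, ?_⟩
        · have := rep_vset m n s V c hmid.rep hinb
          simpa using this
        · intro z
          rw [Finset.mem_insert, List.mem_cons, hmid.vchar z]
          tauto
        · exact List.nodup_cons.mpr ⟨fun hc => hnotV ((hmid.vchar c).mpr (Or.inr hc)),
            hmid.nodup⟩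
        · intro z hz
          rw [List.mem_cons]
          rintro (rfl | hmem)
          · exact hnotV ((hmid.vchar z).mpr (Or.inl hz))
          · exact hmid.disj z hz hmem
        · intro z hz
          rcases Finset.mem_insert.mp hz with rfl | hV
          · exact hreachc
          · exact hmid.reachV z hV
      rw [if_pos hcond]
      obtain ⟨V', hmidF, hsub, hcl⟩ := ih _ _ _ (fun c' hc' => hds c' (by simp [hc'])) hmid' hxy
      refine ⟨V', hmidF, fun z hz => hsub (Finset.mem_insert_of_mem hz), ?_⟩
      intro c' hc' hinb' hval'
      rcases List.mem_cons.mp hc' with rfl | hc''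
      · exact hsub (Finset.mem_insert_self _ _)
      · exact hcl c' hc'' hinb' hval'
    · rw [if_neg hcond]
      obtain ⟨V', hmidF, hsub, hcl⟩ := ih _ _ _ (fun c' hc' => hds c' (by simp [hc'])) hmid hxy
      refine ⟨V', hmidF, hsub, ?_⟩
      intro c' hc' hinb' hval'
      rcases List.mem_cons.mp hc' with rfl | hc''
      · have hvis : vget s c'.1 c'.2 = true := by
          by_contra hb
          exact hcond ⟨hinb'.1, hinb'.2.1, hinb'.2.2.1, hinb'.2.2.2, hb, hval'⟩
        exact hsub ((hmid.rep.2 _ hinb').mp hvis)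
      · exact hcl c' hc'' hinb' hval'

theorem bLoop_nil (grid : List (List Int)) (m n q : Int) (fuel : Nat)
    (s : List (List Bool)) (cnt : Int) : bLoop grid m n q (fuel + 1) s [] cnt = cnt := rfl

theorem bLoop_cons (grid : List (List Int)) (m n q : Int) (fuel : Nat)
    (s : List (List Bool)) (x y : Int) (rest : List (Int × Int)) (cnt : Int) :
    bLoop grid m n q (fuel + 1) s ((x, y) :: rest) cnt =
      bLoop grid m n q fuel
        (([(x, y + 1), (x + 1, y), (x, y - 1), (x - 1, y)].foldl (bStepF grid m n q)
          (s, rest))).1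
        (([(x, y + 1), (x + 1, y), (x, y - 1), (x - 1, y)].foldl (bStepF grid m n q)
          (s, rest))).2 (cnt + 1) := by
  conv_lhs => rw [bLoop]
  rfl

theorem bLoop_spec (grid : List (List Int)) (m n q : Int) (hm : 0 < m) (hn : 0 < n)
    (fuel : Nat) (P V : Finset (Int × Int)) (s : List (List Bool))
    (st : List (Int × Int)) (cnt : Int) (hinv : BInv grid m n q P V s st cnt)
    (hfuel : (m * n).toNat + 1 ≤ fuel + P.card) :
    ∃ P' : Finset (Int × Int), (∀ c : Int × Int, c ∈ P' ↔ Reach grid m n q c) ∧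
      bLoop grid m n q fuel s st cnt = (P'.card : Int) := by
  induction fuel generalizing P V s st cnt with
  | zero =>
    exfalso
    have hsub : P ⊆ allCells m n := by
      intro z hz
      exact (mem_allCells m n z).mpr (Reach_inb grid m n q hm hn z
        (hinv.reachV z ((hinv.vchar z).mpr (Or.inl hz))))
    have := Finset.card_le_card hsub
    rw [card_allCells m n (le_of_lt hm) (le_of_lt hn)] at this
    omega
  | succ fuel ih =>
    match st with
    | [] =>
      refine ⟨P, ?_, by rw [bLoop_nil, hinv.cnt_eq]⟩
      intro c
      constructor
      · intro hc
        exact hinv.reachV c ((hinv.vchar c).mpr (Or.inl hc))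
      · intro hr
        induction hr with
        | base h0 =>
          rcases (hinv.vchar (0, 0)).mp hinv.origin with hP | hst
          · exact hP
          · simp at hst
        | step c d hc hd hdi hdv ihr =>
          have hdV := hinv.closed c ihr d hd hdi hdv
          rcases (hinv.vchar d).mp hdV with hP | hst
          · exact hP
          · simp at hst
    | (x, y) :: rest =>
      have hcst : ((x, y) : Int × Int) ∈ (x, y) :: rest := List.mem_cons_self
      have hcnotP : ((x, y) : Int × Int) ∉ P := fun hP => hinv.disj _ hP hcst
      have hcnotrest : ((x, y) : Int × Int) ∉ rest := (List.nodup_cons.mp hinv.nodup).1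
      have hmid' : BMid grid m n q (insert ((x, y) : Int × Int) P) V s rest := by
        refine ⟨hinv.rep, ?_, (List.nodup_cons.mp hinv.nodup).2, ?_, hinv.reachV⟩
        · intro z
          rw [hinv.vchar z, List.mem_cons, Finset.mem_insert]
          tauto
        · intro z hz
          rcases Finset.mem_insert.mp hz with rfl | hP
          · exact hcnotrest
          · exact fun hr => hinv.disj z hP (List.mem_cons_of_mem _ hr)
      obtain ⟨V', hmidF, hsub, hcl⟩ := bExpandGo grid m n q x y
        (insert ((x, y) : Int × Int) P) [(x, y + 1), (x + 1, y), (x, y - 1), (x - 1, y)]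
        s rest V (fun c hc => by simpa [nbrs] using hc) hmid'
        (Finset.mem_insert_self _ _)
      have hinv' : BInv grid m n q (insert ((x, y) : Int × Int) P) V'
          (([(x, y + 1), (x + 1, y), (x, y - 1), (x - 1, y)].foldl (bStepF grid m n q)
            (s, rest))).1
          (([(x, y + 1), (x + 1, y), (x, y - 1), (x - 1, y)].foldl (bStepF grid m n q)
            (s, rest))).2 (cnt + 1) := by
        refine ⟨hmidF.rep, ?_, hmidF.vchar, hmidF.nodup, hmidF.disj, hmidF.reachV, ?_, ?_⟩
        · rw [Finset.card_insert_of_notMem hcnotP, hinv.cnt_eq]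
          push_cast
          ring
        · intro z hz d hd hdi hdv
          rcases Finset.mem_insert.mp hz with rfl | hP
          · exact hcl d (by simpa [nbrs] using hd) hdi hdv
          · exact hsub (hinv.closed z hP d hd hdi hdv)
        · exact hsub hinv.origin
      have hfuel' : (m * n).toNat + 1 ≤ fuel + (insert ((x, y) : Int × Int) P).card := by
        rw [Finset.card_insert_of_notMem hcnotP]
        omega
      obtain ⟨P', hchar, heq⟩ := ih _ _ _ _ _ hinv' hfuel'
      rw [bLoop_cons]
      exact ⟨P', hchar, heq⟩

-- the value B computes for one query
theorem bAns_char (grid : List (List Int)) (m n : Int) (hm : 0 < m) (hn : 0 < n)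
    (q : Int) (hq : gval grid 0 0 < q) :
    ∃ P' : Finset (Int × Int), (∀ c : Int × Int, c ∈ P' ↔ Reach grid m n q c) ∧
      bLoop grid m n q ((m * n).toNat + 1)
        (vset (List.replicate m.toNat (List.replicate n.toNat false)) 0 0)
        [(0, 0)] 0 = (P'.card : Int) := by
  have h00 : inb m n ((0, 0) : Int × Int) := ⟨le_refl 0, hm, le_refl 0, hn⟩
  have hinv : BInv grid m n q ∅ {((0, 0) : Int × Int)}
      (vset (List.replicate m.toNat (List.replicate n.toNat false)) 0 0) [(0, 0)] 0 := by
    refine ⟨?_, by simp, ?_, by simp, by simp, ?_, by simp, by simp⟩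
    · have := rep_vset m n (List.replicate m.toNat (List.replicate n.toNat false)) ∅
        ((0, 0) : Int × Int) (rep_init m n) h00
      simpa using this
    · intro c
      simp [Finset.mem_singleton]
    · intro c hc
      rw [Finset.mem_singleton] at hc
      subst hc
      exact Reach.base hq
  exact bLoop_spec grid m n q hm hn ((m * n).toNat + 1) ∅ _ _ _ 0 hinv (by simp)

-- the step of A's outer query fold, named for the proofs (definitionally the lambda in maxPointsII)
def outerStep (grid : List (List Int)) (m n : Int)
    (st : List (List Bool) × List (Int × Int × Int) × Int × List Int) (p : Int × Int) :
    List (List Bool) × List (Int × Int × Int) × Int × List Int :=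
  let r := aLoop grid m n p.1 ((m * n).toNat + 1) st.1 st.2.1 st.2.2.1
  (r.1, r.2.1, r.2.2, PySem.List.pySetD st.2.2.2 p.2 r.2.2)

-- ascending first components of sorted2 with integer keys
theorem sorted2_pairwise_fst {α : Type} (xs : List α) (k1 k2 : α → Int) :
    (PySem.List.sorted2 xs k1 k2 false).Pairwise (fun a b => k1 a ≤ k1 b) := by
  have hdef : PySem.List.sorted2 xs k1 k2 false =
      xs.foldl (fun acc x => PySem.List.insertBy
        (fun a b => decide (k1 a < k1 b) ||
          (!decide (k1 b < k1 a) && decide (k2 a < k2 b))) x acc) [] := rfl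
  rw [hdef]
  have main : ∀ (l acc : List α), acc.Pairwise (fun a b => k1 a ≤ k1 b) →
      (l.foldl (fun acc x => PySem.List.insertBy
        (fun a b => decide (k1 a < k1 b) ||
          (!decide (k1 b < k1 a) && decide (k2 a < k2 b))) x acc) acc).Pairwise
        (fun a b => k1 a ≤ k1 b) := by
    intro l
    induction l with
    | nil => intro acc hacc; simpa using hacc
    | cons x t ih =>
      intro acc hacc
      rw [List.foldl_cons]
      refine ih _ (insertBy_pairwise _ _ x acc (fun a b c => le_trans) ?_ ?_ hacc)
      · intro b hb
        simp only [Bool.or_eq_true, Bool.and_eq_true, Bool.not_eq_eq_eq_not,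
          Bool.not_true, decide_eq_true_eq, decide_eq_false_iff_not] at hb
        rcases hb with h | ⟨h, _⟩
        · exact le_of_lt h
        · exact le_of_not_gt h
      · intro b hb
        simp only [Bool.or_eq_true, Bool.and_eq_true, Bool.not_eq_eq_eq_not,
          Bool.not_true, decide_eq_true_eq, decide_eq_false_iff_not] at hb
        rcases lt_or_ge (k1 b) (k1 x) with h | h
        · exact le_of_lt h
        · have h1 : ¬k1 x < k1 b := fun hlt => hb (Or.inl hlt)
          omega
  exact main xs [] List.Pairwise.nil

-- outer fold of A: result cells get filled with B's per-query answers
theorem outer_spec (grid : List (List Int)) (m n : Int) (hm : 0 < m) (hn : 0 < n) :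
    ∀ (l : List (Int × Int)) (w : List (List Bool)) (h : List (Int × Int × Int))
      (pts : Int) (res : List Int) (P V : Finset (Int × Int)),
      AInv grid m n P V w h pts →
      (∀ p ∈ l, ∀ c ∈ P, Reach grid m n p.1 c) →
      l.Pairwise (fun a b => a.1 ≤ b.1) →
      (l.map (fun p => p.2)).Nodup →
      (∀ p ∈ l, 0 ≤ p.2 ∧ p.2 < (res.length : Int)) →
      ((l.foldl (outerStep grid m n) (w, h, pts, res)).2.2.2.length = res.length ∧
       ∀ j : Nat,
         (∀ q : Int, (q, (j : Int)) ∈ l →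
           (l.foldl (outerStep grid m n) (w, h, pts, res)).2.2.2[j]? =
             some (if gval grid 0 0 ≥ q then 0
              else bLoop grid m n q ((m * n).toNat + 1)
                (vset (List.replicate m.toNat (List.replicate n.toNat false)) 0 0)
                [(0, 0)] 0)) ∧
         ((∀ q : Int, (q, (j : Int)) ∉ l) →
           (l.foldl (outerStep grid m n) (w, h, pts, res)).2.2.2[j]? = res[j]?)) := by
  intro l
  induction l with
  | nil =>
    intro w h pts res P V _ _ _ _ _
    refine ⟨rfl, fun j => ⟨fun q hq => absurd hq (by simp), fun _ => rfl⟩⟩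
  | cons p t ih =>
    intro w h pts res P V hinv hmono hsorted hnodup hrange
    obtain ⟨P', V', hsubP, hinv2, hreach2, hend⟩ :=
      aLoop_spec grid m n p.1 ((m * n).toNat + 1) P V w h pts hinv
        (hmono p List.mem_cons_self) (by omega)
    have hchar : ∀ c : Int × Int, c ∈ P' ↔ Reach grid m n p.1 c :=
      aChar grid m n p.1 P' V' _ _ _ hinv2 hreach2 hend
    have hval : (aLoop grid m n p.1 ((m * n).toNat + 1) w h pts).2.2 =
        (if gval grid 0 0 ≥ p.1 then 0
         else bLoop grid m n p.1 ((m * n).toNat + 1)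
           (vset (List.replicate m.toNat (List.replicate n.toNat false)) 0 0)
           [(0, 0)] 0) := by
      by_cases hq : gval grid 0 0 < p.1
      · rw [if_neg (not_le.mpr hq)]
        obtain ⟨P'', hchar'', heq⟩ := bAns_char grid m n hm hn p.1 hq
        have hPP : P' = P'' := Finset.ext fun c => (hchar c).trans (hchar'' c).symm
        rw [hinv2.pts_eq, hPP]
        exact heq.symm
      · rw [if_pos (le_of_not_gt hq)]
        have hempty : P' = ∅ := by
          ext c
          simp only [Finset.notMem_empty, iff_false]
          intro hc
          exact hq (Reach_base_lt grid m n p.1 c ((hchar c).mp hc))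
        rw [hinv2.pts_eq, hempty]
        simp
    have hstep : outerStep grid m n (w, h, pts, res) p =
        ((aLoop grid m n p.1 ((m * n).toNat + 1) w h pts).1,
         (aLoop grid m n p.1 ((m * n).toNat + 1) w h pts).2.1,
         (aLoop grid m n p.1 ((m * n).toNat + 1) w h pts).2.2,
         PySem.List.pySetD res p.2 (aLoop grid m n p.1 ((m * n).toNat + 1) w h pts).2.2) := rfl
    have hrangep := hrange p List.mem_cons_self
    have hres1 : PySem.List.pySetD res p.2 (aLoop grid m n p.1 ((m * n).toNat + 1) w h pts).2.2 =
        res.set p.2.toNat (aLoop grid m n p.1 ((m * n).toNat + 1) w h pts).2.2 :=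
      PySem.List.pySetD_of_nonneg res _ hrangep.1
    have hmono' : ∀ p' ∈ t, ∀ c ∈ P', Reach grid m n p'.1 c := by
      intro p' hp' c hc
      exact Reach_mono grid m n p.1 p'.1 ((List.pairwise_cons.mp hsorted).1 p' hp') c
        ((hchar c).mp hc)
    have hrange' : ∀ p' ∈ t, 0 ≤ p'.2 ∧ p'.2 <
        ((PySem.List.pySetD res p.2 (aLoop grid m n p.1 ((m * n).toNat + 1) w h pts).2.2).length : Int) := by
      intro p' hp'
      rw [PySem.List.length_pySetD]
      exact hrange p' (List.mem_cons_of_mem _ hp')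
    obtain ⟨ihlen, ihcl⟩ := ih _ _ _ _ P' V' hinv2 hmono' hsorted.of_cons
      (by
        have := hnodup
        simp only [List.map_cons, List.nodup_cons] at this
        exact this.2) hrange'
    have hpnotint : p.2 ∉ t.map (fun p => p.2) := by
      have := hnodup
      simp only [List.map_cons, List.nodup_cons] at this
      exact this.1
    rw [List.foldl_cons, hstep]
    constructor
    · rw [ihlen, PySem.List.length_pySetD]
    · intro j
      constructor
      · intro q hq
        rcases List.mem_cons.mp hq with heq | hqt
        · -- the head pair writes position j; no later pair touches j
          have hp2 : p.2 = (j : Int) := by rw [← heq]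
          have hp1 : p.1 = q := by rw [← heq]
          have hnotint : ∀ q' : Int, (q', (j : Int)) ∉ t := by
            intro q' hq'
            apply hpnotint
            rw [← hp2] at hq'
            exact List.mem_map.mpr ⟨(q', p.2), hq', rfl⟩
          have := (ihcl j).2 hnotint
          rw [this, hres1, List.getElem?_set]
          have hjlen : j < res.length := by omega
          have hjeq : p.2.toNat = j := by omega
          rw [if_pos hjeq, if_pos (by omega), ← hp1, hval]
        · exact (ihcl j).1 q hqt
      · intro hnotin
        have hnotint : ∀ q' : Int, (q', (j : Int)) ∉ t := fun q' hq' =>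
          hnotin q' (List.mem_cons_of_mem _ hq')
        have hp2ne : p.2.toNat ≠ j ∨ ¬(0 ≤ p.2) := by
          by_cases h0 : p.2 = (j : Int)
          · exfalso
            apply hnotin p.1
            have : p = (p.1, (j : Int)) := by rw [← h0]
            exact this ▸ List.mem_cons_self
          · left
            omega
        have := (ihcl j).2 hnotint
        rw [this, hres1, List.getElem?_set]
        have hne : p.2.toNat ≠ j := by
          rcases hp2ne with h | h
          · exact h
          · exact absurd hrangep.1 h
        rw [if_neg hne]

-- ===== VERDICT (by name: the statement is the Claim_ definition above) =====
theorem maxPointsII_spec : Claim_equal_maxPointsII := by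
  intro grid queries _hdom hpre
  obtain ⟨hm0, hn0, _⟩ := hpre
  show maxPointsII grid queries = maxPointsII_alt grid queries
  have hm : (0 : Int) < (grid.length : Int) := by exact_mod_cast hm0
  have hn : (0 : Int) < ((PySem.List.pyGetD grid 0 []).length : Int) := by exact_mod_cast hn0
  have hA : maxPointsII grid queries =
      ((PySem.List.sorted2
          ((PySem.List.enumerate queries).map (fun p => (p.2, p.1)))
          (fun p => p.1) (fun p => p.2) false).foldl
        (outerStep grid (grid.length : Int) ((PySem.List.pyGetD grid 0 []).length : Int))
        (vset (List.replicate (grid.length : Int).toNat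
            (List.replicate ((PySem.List.pyGetD grid 0 []).length : Int).toNat false)) 0 0,
          [(gval grid 0 0, 0, 0)], 0,
          List.replicate queries.length 0)).2.2.2 := rfl
  have hB : maxPointsII_alt grid queries =
      queries.map (fun q =>
        if gval grid 0 0 ≥ q then 0
        else bLoop grid (grid.length : Int) ((PySem.List.pyGetD grid 0 []).length : Int) q
          (((grid.length : Int) * ((PySem.List.pyGetD grid 0 []).length : Int)).toNat + 1)
          (vset (List.replicate (grid.length : Int).toNat
            (List.replicate ((PySem.List.pyGetD grid 0 []).length : Int).toNat false)) 0 0)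
          [(0, 0)] 0) := rfl
  have h00 : inb (grid.length : Int) ((PySem.List.pyGetD grid 0 []).length : Int)
      ((0, 0) : Int × Int) := ⟨le_refl 0, hm, le_refl 0, hn⟩
  have hinv0 : AInv grid (grid.length : Int) ((PySem.List.pyGetD grid 0 []).length : Int)
      ∅ {((0, 0) : Int × Int)}
      (vset (List.replicate (grid.length : Int).toNat
        (List.replicate ((PySem.List.pyGetD grid 0 []).length : Int).toNat false)) 0 0)
      [(gval grid 0 0, 0, 0)] 0 := by
    refine ⟨?_, by simp, ?_, by simp,
      by intro c hc; exact absurd hc (Finset.notMem_empty c), by simp, ?_,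
      by intro c hc; exact absurd hc (Finset.notMem_empty c), by simp,
      by intro c hc; exact absurd hc (Finset.notMem_empty c)⟩
    · have := rep_vset (grid.length : Int) ((PySem.List.pyGetD grid 0 []).length : Int)
        (List.replicate (grid.length : Int).toNat
          (List.replicate ((PySem.List.pyGetD grid 0 []).length : Int).toNat false)) ∅
        ((0, 0) : Int × Int)
        (rep_init (grid.length : Int) ((PySem.List.pyGetD grid 0 []).length : Int)) h00
      simpa using this
    · intro c
      simp [Finset.mem_singleton]
    · intro e he
      simp only [List.mem_cons, List.not_mem_nil, or_false] at he
      subst he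
      exact ⟨rfl, h00, Or.inl rfl⟩
  have hperm : (PySem.List.sorted2
      ((PySem.List.enumerate queries).map (fun p => (p.2, p.1)))
      (fun p => p.1) (fun p => p.2) false).Perm
      ((PySem.List.enumerate queries).map (fun p => (p.2, p.1))) :=
    PySem.List.sorted2_perm _ _ _ _
  have hsorted := sorted2_pairwise_fst
    ((PySem.List.enumerate queries).map (fun p => (p.2, p.1)))
    (fun p => p.1) (fun p => p.2)
  have hLsnd : ((PySem.List.enumerate queries).map (fun p => (p.2, p.1))).map
      (fun p => p.2) = (PySem.List.enumerate queries).map (fun p => p.1) := by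
    rw [List.map_map]
    rfl
  have hsnd_nodup : ((PySem.List.sorted2
      ((PySem.List.enumerate queries).map (fun p => (p.2, p.1)))
      (fun p => p.1) (fun p => p.2) false).map (fun p => p.2)).Nodup := by
    refine ((hperm.map (fun p => p.2)).nodup_iff).mpr ?_
    rw [hLsnd, PySem.List.map_fst_enumerate]
    exact PySem.List.nodup_pyRange_one _ _
  have hmemL : ∀ jn : Nat, ∀ hj : jn < queries.length,
      ((queries[jn], (jn : Int)) : Int × Int) ∈
        (PySem.List.enumerate queries).map (fun p => (p.2, p.1)) := by
    intro jn hj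
    exact List.mem_map.mpr ⟨((jn : Int), queries[jn]),
      (PySem.List.mem_enumerate_iff _ _ _).mpr ⟨jn, hj, by simp⟩, rfl⟩
  have hrange : ∀ p ∈ PySem.List.sorted2
      ((PySem.List.enumerate queries).map (fun p => (p.2, p.1)))
      (fun p => p.1) (fun p => p.2) false,
      0 ≤ p.2 ∧ p.2 < ((List.replicate queries.length (0 : Int)).length : Int) := by
    intro p hp
    have hpL := hperm.mem_iff.mp hp
    obtain ⟨pp, hpp, heq⟩ := List.mem_map.mp hpL
    obtain ⟨k, hk, hpk⟩ := (PySem.List.mem_enumerate_iff _ _ _).mp hpp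
    subst hpk
    subst heq
    simp only [List.length_replicate]
    constructor
    · simp
    · simpa using by exact_mod_cast hk
  obtain ⟨hlen, hcl⟩ := outer_spec grid (grid.length : Int)
    ((PySem.List.pyGetD grid 0 []).length : Int) hm hn
    (PySem.List.sorted2
      ((PySem.List.enumerate queries).map (fun p => (p.2, p.1)))
      (fun p => p.1) (fun p => p.2) false)
    (vset (List.replicate (grid.length : Int).toNat
      (List.replicate ((PySem.List.pyGetD grid 0 []).length : Int).toNat false)) 0 0)
    [(gval grid 0 0, 0, 0)] 0 (List.replicate queries.length 0) ∅ {((0, 0) : Int × Int)}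
    hinv0 (by intro p hp c hc; exact absurd hc (Finset.notMem_empty c))
    hsorted hsnd_nodup hrange
  rw [hA, hB]
  apply List.ext_getElem?
  intro j
  by_cases hj : j < queries.length
  · have hmem : ((queries[j], (j : Int)) : Int × Int) ∈ PySem.List.sorted2
        ((PySem.List.enumerate queries).map (fun p => (p.2, p.1)))
        (fun p => p.1) (fun p => p.2) false :=
      hperm.mem_iff.mpr (hmemL j hj)
    rw [(hcl j).1 queries[j] hmem]
    rw [List.getElem?_map, List.getElem?_eq_getElem hj]
    rfl
  · rw [List.getElem?_eq_none, List.getElem?_eq_none]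
    · simpa using by omega
    · rw [hlen]
      simpa using by omega
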